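-- pv_equiv track=rewrite | github.com/PaperAnonymous/aaai19 | util.py | array2tuple
-- ===== SOURCE A (Python) =====
-- def array2tuple(a):
-- 	b = ()
-- 	for _, k in enumerate(a):
-- 		if k == 0:
-- 			break
-- 		else:
-- 			b += (k, )
-- 	return b
-- ===== SOURCE B (Python) =====
-- def array2tuple(a):
--     b = tuple(a)
--     try:
--         i = b.index(0)
--     except ValueError:
--         return b
--     return b[:i]
-- ===== Notes on version B (the rewrite author's own statement) =====
-- stated objective: alternative
-- what changed: Instead of one element-by-element loop with an accumulator and break, B materialises the tuple once, locates the first zero with tuple.index, and returns the slice before it (whole tuple if no zero).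
import Mathlib
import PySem

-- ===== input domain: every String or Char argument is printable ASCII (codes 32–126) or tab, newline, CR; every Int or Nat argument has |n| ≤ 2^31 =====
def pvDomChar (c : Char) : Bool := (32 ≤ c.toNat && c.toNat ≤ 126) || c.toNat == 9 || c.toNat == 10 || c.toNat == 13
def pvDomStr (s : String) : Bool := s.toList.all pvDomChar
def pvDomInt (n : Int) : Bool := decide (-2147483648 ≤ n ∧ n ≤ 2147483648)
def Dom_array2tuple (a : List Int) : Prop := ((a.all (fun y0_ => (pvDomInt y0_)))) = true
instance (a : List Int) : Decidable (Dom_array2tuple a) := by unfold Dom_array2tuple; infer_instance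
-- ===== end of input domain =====

-- B replaces A's accumulate-until-break loop by two staged operations: find the first zero's index, then slice before it.

-- ===== PORT A =====
-- the for-loop with break: accumulator b, stop at the first zero
def array2tupleLoop (b : List Int) : List Int → List Int
  | [] => b
  | k :: rest => if k == 0 then b else array2tupleLoop (b ++ [k]) rest

def array2tuple (a : List Int) : List Int := array2tupleLoop [] a

-- ===== PORT B =====
-- b.index(0) → PySem.List.index?; ValueError (none) → whole list; b[:i] → slice
def array2tuple_alt (a : List Int) : List Int :=
  match PySem.List.index? a 0 with
  | none => a
  | some i => PySem.List.slice a none (some (i : Int))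

-- ===== PRECONDITION & SPEC =====
def Spec_array2tuple (a : List Int) (out : List Int) : Prop := out = array2tuple_alt a
instance (a : List Int) (out : List Int) : Decidable (Spec_array2tuple a out) := by unfold Spec_array2tuple; infer_instance

-- ===== CLAIM =====
def Claim_equal_array2tuple : Prop := ∀ (a : List Int), Dom_array2tuple a → Spec_array2tuple a (array2tuple a)

-- ===== LEMMAS AND PROOFS =====
theorem alt_cons_ne (k : Int) (rest : List Int) (h : k ≠ 0) :
    array2tuple_alt (k :: rest) = k :: array2tuple_alt rest := by
  unfold array2tuple_alt
  rw [PySem.List.index?_cons_of_ne rest h]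
  cases hi : PySem.List.index? rest 0 with
  | none => simp
  | some i =>
    simp only [Option.map_some]
    rw [PySem.List.slice_to_natCast, PySem.List.slice_to_natCast]
    simp [List.take_succ_cons]

theorem array2tupleLoop_eq (a : List Int) : ∀ (b : List Int),
    array2tupleLoop b a = b ++ array2tuple_alt a := by
  induction a with
  | nil => intro b; simp [array2tupleLoop, array2tuple_alt, PySem.List.index?]
  | cons k rest ih =>
    intro b
    by_cases h : k = 0
    · subst h
      unfold array2tuple_alt
      rw [PySem.List.index?_cons_self]
      simp [array2tupleLoop, PySem.List.slice, PySem.List.clampIdx]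
    · simp [array2tupleLoop, h, ih, alt_cons_ne k rest h]

-- ===== VERDICT =====
theorem array2tuple_spec : Claim_equal_array2tuple := by
  intro a _
  unfold Spec_array2tuple array2tuple
  simpa using array2tupleLoop_eq a []
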